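-- pv_equiv track=rewrite | github.com/dinosawrusrex/adventofcode2k21 | day8.py | segment_0
-- ===== SOURCE A (Python) =====
-- def segment_0(signal):
--     one, seven = '', ''
--     for v in signal.split():
--         if len(v) == 2:
--             one = v
--         if len(v) == 3:
--             seven = v
--         if one and seven:
--             return seven.replace(one[0], '').replace(one[1], '')
-- ===== SOURCE B (Python) =====
-- def segment_0(sig):
--     tokens = sig.split()
--     one = next((v for v in tokens if len(v) == 2), None)
--     seven = next((v for v in tokens if len(v) == 3), None)
--     if one is None or seven is None:
--         return None
--     return ''.join(c for c in seven if c not in one)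
-- ===== Notes on version B (the rewrite author's own statement) =====
-- stated objective: simpler
-- what changed: A's single early-returning loop with two overwritten string accumulators is replaced by two independent first-match searches over the split tokens plus an order-preserving character-membership filter instead of the chained str.replace calls; Pre_ excludes signals with a second length-2 or length-3 token by the loop's stopping point, where A's most-recent-token choice is an accidental first-vs-last corner.
-- outside the precondition, e.g. on segment_0('ab cb abc'): A returns 'a', B returns 'c'
import Mathlib
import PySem

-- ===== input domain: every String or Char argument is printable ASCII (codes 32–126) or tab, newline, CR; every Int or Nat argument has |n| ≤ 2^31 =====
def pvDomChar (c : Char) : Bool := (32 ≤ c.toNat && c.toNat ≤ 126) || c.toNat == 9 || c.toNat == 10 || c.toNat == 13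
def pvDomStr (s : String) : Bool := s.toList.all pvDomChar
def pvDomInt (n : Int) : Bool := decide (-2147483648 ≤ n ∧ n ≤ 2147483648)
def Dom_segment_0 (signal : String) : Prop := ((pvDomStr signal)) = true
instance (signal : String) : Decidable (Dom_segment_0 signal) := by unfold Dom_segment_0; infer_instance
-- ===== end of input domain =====

-- B replaces A's single early-returning stateful loop by two independent first-match
-- searches over the split tokens plus an order-preserving character filter
-- (objective: simpler, same cost).

-- ===== PORT A =====
-- 'for v in signal.split(): …' with early return; state (one, seven)
def segment0Loop : List String → String → String → Option String
  | [], _, _ => none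
  | v :: rest, one, seven =>
    let one' := if PySem.Str.len v == 2 then v else one
    let seven' := if PySem.Str.len v == 3 then v else seven
    if one' ≠ "" ∧ seven' ≠ "" then
      -- seven.replace(one[0], '').replace(one[1], '')  (one[i] is a 1-char string;
      -- the .getD ' ' default is never used: here one' is a token of length 2)
      some (PySem.Str.replace
              (PySem.Str.replace seven' (String.ofList [(PySem.Str.pyGet? one' 0).getD ' ']) "")
              (String.ofList [(PySem.Str.pyGet? one' 1).getD ' ']) "")
    else segment0Loop rest one' seven'

def segment_0 (signal : String) : Option String :=
  segment0Loop (PySem.Str.split₀ signal) "" ""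

-- ===== PORT B =====
-- first length-2 token, first length-3 token; then the characters of seven
-- that do not occur in one, joined in order
def segment_0_alt (signal : String) : Option String :=
  let tokens := PySem.Str.split₀ signal
  match tokens.find? (fun v => PySem.Str.len v == 2),
        tokens.find? (fun v => PySem.Str.len v == 3) with
  | some one, some seven =>
    some (String.ofList (seven.toList.filter (fun c => !(one.toList.contains c))))
  | _, _ => none

-- ===== PRECONDITION & SPEC =====
-- Pre_ excludes signals that contain a second length-2 (or length-3) token by the
-- point where A's loop stops: there A returns the strip by the MOST RECENT such token
-- while B uses the FIRST — a first-vs-last corner on duplicate patterns where either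
-- choice is defensible (an AoC line has exactly one token of each kind).
def pvP2 (v : String) : Bool := PySem.Str.len v == 2
def pvP3 (v : String) : Bool := PySem.Str.len v == 3
def pvPreTok (toks : List String) : Bool :=
  ((toks.findIdx? pvP2).bind (fun i2 => (toks.findIdx? pvP3).map (fun i3 =>
    decide (((toks.take (max i2 i3 + 1)).filter pvP2).length ≤ 1) &&
    decide (((toks.take (max i2 i3 + 1)).filter pvP3).length ≤ 1)))).getD true

def Pre_segment_0 (signal : String) : Prop := pvPreTok (PySem.Str.split₀ signal) = true
instance (signal : String) : Decidable (Pre_segment_0 signal) := by unfold Pre_segment_0; infer_instance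

def pvWitness_segment_0 : String := "ab abc"

def Spec_segment_0 (signal : String) (out : Option String) : Prop := out = segment_0_alt signal
instance (signal : String) (out : Option String) : Decidable (Spec_segment_0 signal out) := by unfold Spec_segment_0; infer_instance

-- ===== CLAIM (what is proved, stated in full; the proofs are below) =====
def Claim_equal_segment_0 : Prop := ∀ (signal : String), Dom_segment_0 signal → Pre_segment_0 signal → Spec_segment_0 signal (segment_0 signal)

-- ===== LEMMAS AND PROOFS =====

-- A's strip expression, named for the proofs
def pvStripA (one seven : String) : Option String :=
  some (PySem.Str.replace
          (PySem.Str.replace seven (String.ofList [(PySem.Str.pyGet? one 0).getD ' ']) "")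
          (String.ofList [(PySem.Str.pyGet? one 1).getD ' ']) "")
-- closed characterisation of A's loop: stop index max i2 i3, latest token of each kind
def pvAlt (toks : List String) : Option String :=
  match toks.findIdx? pvP2, toks.findIdx? pvP3 with
  | some i2, some i3 =>
    match (toks.take (max i2 i3 + 1)).reverse.find? pvP2,
          (toks.take (max i2 i3 + 1)).reverse.find? pvP3 with
    | some one, some seven => pvStripA one seven
    | _, _ => none
  | _, _ => none
-- B's body as a function of the token list
def pvAltB (toks : List String) : Option String :=
  match toks.find? pvP2, toks.find? pvP3 with
  | some one, some seven =>
    some (String.ofList (seven.toList.filter (fun c => !(one.toList.contains c))))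
  | _, _ => none

lemma pvAltB_eq (signal : String) : segment_0_alt signal = pvAltB (PySem.Str.split₀ signal) := rfl

lemma pvP2_ne_empty {v : String} (h : pvP2 v = true) : v ≠ "" := by
  intro hv; subst hv; exact absurd h (by decide)

lemma pvP3_ne_empty {v : String} (h : pvP3 v = true) : v ≠ "" := by
  intro hv; subst hv; exact absurd h (by decide)

lemma pvP2_len {v : String} (h : pvP2 v = true) : v.toList.length = 2 := by
  simp only [pvP2, PySem.Str.len_eq, beq_iff_eq] at h
  exact_mod_cast h

lemma pvP3_len {v : String} (h : pvP3 v = true) : v.toList.length = 3 := by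
  simp only [pvP3, PySem.Str.len_eq, beq_iff_eq] at h
  exact_mod_cast h

lemma pvP2_not_P3 {v : String} (h : pvP2 v = true) : pvP3 v = false := by
  have h2 := pvP2_len h
  simp only [pvP3, PySem.Str.len_eq, beq_eq_false_iff_ne, ne_eq, h2]
  intro hc
  exact absurd (by exact_mod_cast hc) (by omega)

lemma pvP3_not_P2 {v : String} (h : pvP3 v = true) : pvP2 v = false := by
  have h3 := pvP3_len h
  simp only [pvP2, PySem.Str.len_eq, beq_eq_false_iff_ne, ne_eq, h3]
  intro hc
  exact absurd (by exact_mod_cast hc) (by omega)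

-- the fueled core of str.replace, for a single-char pattern and empty replacement
lemma pvReplace_go (a : Char) : ∀ (fuel : Nat) (l acc : List Char), l.length ≤ fuel →
    PySem.Chars.replace.go [a] [] fuel l acc = acc.reverse ++ l.filter (fun c => c != a) := by
  intro fuel
  induction fuel with
  | zero =>
    intro l acc h
    have hl : l = [] := List.eq_nil_of_length_eq_zero (Nat.le_zero.mp h)
    subst hl; simp [PySem.Chars.replace.go]
  | succ n ih =>
    intro l acc h
    cases l with
    | nil => simp [PySem.Chars.replace.go]
    | cons c t =>
      rw [PySem.Chars.replace.go]
      have hpre : ([a].isPrefixOf (c :: t)) = (a == c) := by simp [List.isPrefixOf]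
      rw [hpre]
      by_cases hac : a = c
      · subst hac
        simp only [BEq.rfl, if_true, List.length_singleton, List.drop_succ_cons,
          List.drop_zero, List.reverse_nil, List.nil_append]
        rw [ih t acc (by simpa using Nat.le_of_succ_le_succ (by simpa using h))]
        simp
      · have hb : (a == c) = false := by simpa using hac
        rw [hb]
        simp only [Bool.false_eq_true, if_false]
        rw [ih t (c :: acc) (by simpa using Nat.le_of_succ_le_succ (by simpa using h))]
        have hc : (c != a) = true := by simpa using fun hca => hac hca.symm
        simp [hc]

lemma pvReplace_single (s : List Char) (a : Char) :
    PySem.Chars.replace s [a] [] = s.filter (fun c => c != a) := by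
  rw [PySem.Chars.replace]
  simp only [List.isEmpty_cons, Bool.false_eq_true, if_false]
  simpa using pvReplace_go a s.length s [] le_rfl

-- A's replace chain equals B's membership filter when `one` has length 2
lemma pvStrip_eq {one : String} (seven : String) (h : pvP2 one = true) :
    pvStripA one seven =
      some (String.ofList (seven.toList.filter (fun c => !(one.toList.contains c)))) := by
  have hl : one.toList.length = 2 := pvP2_len h
  obtain ⟨a, b, hL⟩ : ∃ a b, one.toList = [a, b] := by
    cases hT : one.toList with
    | nil => rw [hT] at hl; simp at hl
    | cons a t =>
      cases t with
      | nil => rw [hT] at hl; simp at hl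
      | cons b u =>
        cases u with
        | nil => exact ⟨a, b, by simp⟩
        | cons x y => rw [hT] at hl; simp at hl
  have h0 : PySem.Str.pyGet? one 0 = some a := by
    simp [PySem.Str.pyGet?, PySem.Chars.pyGet?, hL, PySem.List.pyGet?, PySem.List.pyIdx?]
  have h1 : PySem.Str.pyGet? one 1 = some b := by
    simp [PySem.Str.pyGet?, PySem.Chars.pyGet?, hL, PySem.List.pyGet?, PySem.List.pyIdx?]
  rw [pvStripA, h0, h1]
  simp only [Option.getD_some, PySem.Str.replace, hL]
  congr 1
  rw [String.toList_ofList, String.toList_ofList, String.toList_empty,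
    String.toList_ofList, pvReplace_single, pvReplace_single, List.filter_filter]
  refine congrArg String.ofList (List.filter_congr (fun c _ => ?_))
  by_cases hca : c = a <;> by_cases hcb : c = b <;> simp [hca, hcb]

-- A's loop from the state 'one = o (a length-2 token), seven not yet seen'
lemma pvLoop2 : ∀ (toks : List String) (o : String), pvP2 o = true →
    segment0Loop toks o "" =
      match toks.findIdx? pvP3 with
      | none => none
      | some j => pvStripA (((toks.take j).reverse.find? pvP2).getD o) (toks.getD j "") := by
  intro toks
  induction toks with
  | nil => intro o h; simp [segment0Loop]
  | cons v rest ih =>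
    intro o h2
    have ho : o ≠ "" := pvP2_ne_empty h2
    rw [segment0Loop]
    by_cases h3 : pvP3 v = true
    · have h2v : pvP2 v = false := pvP3_not_P2 h3
      have h2v' := h2v; have h3' := h3
      simp only [pvP2] at h2v'; simp only [pvP3] at h3'
      simp only [h2v', h3', Bool.false_eq_true, if_false, if_true,
        List.findIdx?_cons, h3, List.take_zero, List.reverse_nil, List.find?_nil,
        Option.getD_none, List.getD_cons_zero]
      rw [if_pos ⟨ho, pvP3_ne_empty h3⟩]
      rfl
    · have h3b : pvP3 v = false := by simpa using h3
      have h3b' := h3b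
      simp only [pvP3] at h3b'
      simp only [h3b', Bool.false_eq_true, if_false, List.findIdx?_cons, h3b]
      rw [if_neg (by simp)]
      by_cases hv : pvP2 v = true
      · have hv' := hv; simp only [pvP2] at hv'
        simp only [hv', if_true]
        rw [ih v hv]
        cases hj : rest.findIdx? pvP3 with
        | none => simp
        | some j =>
          simp only [Option.map_some, List.take_succ_cons, List.reverse_cons,
            List.find?_append, List.getD_cons_succ]
          cases hX : (rest.take j).reverse.find? pvP2 with
          | none => simp [hv]
          | some u => simp
      · have hvb : pvP2 v = false := by simpa using hv
        have hvb' := hvb; simp only [pvP2] at hvb'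
        simp only [hvb', Bool.false_eq_true, if_false]
        rw [ih o h2]
        cases hj : rest.findIdx? pvP3 with
        | none => simp
        | some j =>
          simp only [Option.map_some, List.take_succ_cons, List.reverse_cons,
            List.find?_append, List.getD_cons_succ, List.find?_cons, hvb]
          cases hX : (rest.take j).reverse.find? pvP2 with
          | none => simp
          | some u => simp

-- A's loop from the state 'seven = s (a length-3 token), one not yet seen'
lemma pvLoop3 : ∀ (toks : List String) (s : String), pvP3 s = true →
    segment0Loop toks "" s =
      match toks.findIdx? pvP2 with
      | none => none
      | some i => pvStripA (toks.getD i "") (((toks.take i).reverse.find? pvP3).getD s) := by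
  intro toks
  induction toks with
  | nil => intro s h; simp [segment0Loop]
  | cons v rest ih =>
    intro s h3
    have hs : s ≠ "" := pvP3_ne_empty h3
    rw [segment0Loop]
    by_cases h2 : pvP2 v = true
    · have h3v : pvP3 v = false := pvP2_not_P3 h2
      have h3v' := h3v; have h2' := h2
      simp only [pvP3] at h3v'; simp only [pvP2] at h2'
      simp only [h3v', h2', Bool.false_eq_true, if_false, if_true,
        List.findIdx?_cons, h2, List.take_zero, List.reverse_nil, List.find?_nil,
        Option.getD_none, List.getD_cons_zero]
      rw [if_pos ⟨pvP2_ne_empty h2, hs⟩]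
      rfl
    · have h2b : pvP2 v = false := by simpa using h2
      have h2b' := h2b
      simp only [pvP2] at h2b'
      simp only [h2b', Bool.false_eq_true, if_false, List.findIdx?_cons, h2b]
      rw [if_neg (by simp)]
      by_cases hv : pvP3 v = true
      · have hv' := hv; simp only [pvP3] at hv'
        simp only [hv', if_true]
        rw [ih v hv]
        cases hi : rest.findIdx? pvP2 with
        | none => simp
        | some i =>
          simp only [Option.map_some, List.take_succ_cons, List.reverse_cons,
            List.find?_append, List.getD_cons_succ]
          cases hY : (rest.take i).reverse.find? pvP3 with
          | none => simp [hv]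
          | some u => simp
      · have hvb : pvP3 v = false := by simpa using hv
        have hvb' := hvb; simp only [pvP3] at hvb'
        simp only [hvb', Bool.false_eq_true, if_false]
        rw [ih s h3]
        cases hi : rest.findIdx? pvP2 with
        | none => simp
        | some i =>
          simp only [Option.map_some, List.take_succ_cons, List.reverse_cons,
            List.find?_append, List.getD_cons_succ, List.find?_cons, hvb]
          cases hY : (rest.take i).reverse.find? pvP3 with
          | none => simp
          | some u => simp

-- a token matching neither predicate changes nothing in pvAlt
lemma pvAlt_cons_skip {v : String} {rest : List String}
    (h2 : pvP2 v = false) (h3 : pvP3 v = false) : pvAlt (v :: rest) = pvAlt rest := by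
  simp only [pvAlt, List.findIdx?_cons, h2, h3, Bool.false_eq_true, if_false]
  cases hi : rest.findIdx? pvP2 with
  | none => simp
  | some i =>
    cases hj : rest.findIdx? pvP3 with
    | none => simp
    | some j =>
      simp only [Option.map_some]
      have hmax : max (i + 1) (j + 1) = max i j + 1 := by omega
      rw [hmax, List.take_succ_cons]
      simp only [List.reverse_cons, List.find?_append, List.find?_cons, h2, h3,
        List.find?_nil, Option.or_none]

lemma pvMain : ∀ toks : List String, segment0Loop toks "" "" = pvAlt toks := by
  intro toks
  induction toks with
  | nil => simp [segment0Loop, pvAlt]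
  | cons v rest ih =>
    rw [segment0Loop]
    by_cases h2 : pvP2 v = true
    · have h3v : pvP3 v = false := pvP2_not_P3 h2
      have h2' := h2; have h3v' := h3v
      simp only [pvP2] at h2'; simp only [pvP3] at h3v'
      simp only [h2', h3v', Bool.false_eq_true, if_false, if_true]
      rw [if_neg (by simp)]
      rw [pvLoop2 rest v h2]
      simp only [pvAlt, List.findIdx?_cons, h2, h3v, Bool.false_eq_true, if_false, if_true]
      cases hj : rest.findIdx? pvP3 with
      | none => simp
      | some j =>
        obtain ⟨hjlt, hpj, -⟩ := List.findIdx?_eq_some_iff_getElem.mp hj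
        have hp2j : pvP2 rest[j] = false := pvP3_not_P2 hpj
        simp only [Option.map_some]
        have hmax : max 0 (j + 1) = j + 1 := by omega
        rw [hmax, List.take_succ_cons, List.take_add_one, List.getElem?_eq_getElem hjlt]
        simp only [Option.toList_some, List.reverse_cons, List.reverse_append,
          List.find?_cons, hp2j, hpj, List.find?_append, List.find?_nil]
        rw [List.getD_eq_getElem rest "" hjlt]
        cases hX : (rest.take j).reverse.find? pvP2 with
        | none => simp [h2]
        | some u => simp
    · have h2b : pvP2 v = false := by simpa using h2
      have h2b' := h2b; simp only [pvP2] at h2b'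
      simp only [h2b', Bool.false_eq_true, if_false]
      by_cases h3 : pvP3 v = true
      · have h3' := h3; simp only [pvP3] at h3'
        simp only [h3', if_true]
        rw [if_neg (by simp)]
        rw [pvLoop3 rest v h3]
        simp only [pvAlt, List.findIdx?_cons, h2b, h3, Bool.false_eq_true, if_false, if_true]
        cases hi : rest.findIdx? pvP2 with
        | none => simp
        | some i =>
          obtain ⟨hilt, hpi, -⟩ := List.findIdx?_eq_some_iff_getElem.mp hi
          have hp3i : pvP3 rest[i] = false := pvP2_not_P3 hpi
          simp only [Option.map_some]
          have hmax : max (i + 1) 0 = i + 1 := by omega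
          rw [hmax, List.take_succ_cons, List.take_add_one, List.getElem?_eq_getElem hilt]
          simp only [Option.toList_some, List.reverse_cons, List.reverse_append,
            List.find?_cons, hp3i, hpi, List.find?_append, List.find?_nil]
          rw [List.getD_eq_getElem rest "" hilt]
          cases hY : (rest.take i).reverse.find? pvP3 with
          | none => simp [h3]
          | some u => simp
      · have h3b : pvP3 v = false := by simpa using h3
        have h3b' := h3b; simp only [pvP3] at h3b'
        simp only [h3b', Bool.false_eq_true, if_false]
        rw [if_neg (by simp)]
        rw [ih, pvAlt_cons_skip h2b h3b]

-- on a list whose p-matches number at most one, two matches coincide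
lemma pvUniq {p : String → Bool} {l : List String} (h : (l.filter p).length ≤ 1)
    {x y : String} (hx : x ∈ l) (hpx : p x = true) (hy : y ∈ l) (hpy : p y = true) : x = y := by
  have hx' : x ∈ l.filter p := List.mem_filter.mpr ⟨hx, hpx⟩
  have hy' : y ∈ l.filter p := List.mem_filter.mpr ⟨hy, hpy⟩
  match hf : l.filter p with
  | [] => rw [hf] at hx'; simp at hx'
  | [z] =>
    rw [hf] at hx' hy'
    simp only [List.mem_singleton] at hx' hy'
    rw [hx', hy']
  | a :: b :: t => rw [hf] at h; simp at h

-- on the prefix `seen`, the backward search finds the unique match = the global first match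
lemma pvFindRev {p : String → Bool} {toks : List String} {i : Nat}
    (hilt : i < toks.length) (hpi : p toks[i] = true) {n : Nat} (hin : i < n)
    (hu : ((toks.take n).filter p).length ≤ 1) :
    (toks.take n).reverse.find? p = some toks[i] := by
  have hmem : toks[i] ∈ toks.take n := by
    have hlen : i < (toks.take n).length := by simp [List.length_take]; omega
    have : (toks.take n)[i] = toks[i] := List.getElem_take
    exact this ▸ List.getElem_mem hlen
  cases hf : (toks.take n).reverse.find? p with
  | none =>
    have := List.find?_eq_none.mp hf toks[i] (List.mem_reverse.mpr hmem)
    exact absurd hpi this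
  | some x =>
    have hxm : x ∈ toks.take n := List.mem_reverse.mp (List.mem_of_find?_eq_some hf)
    have hpx : p x = true := List.find?_some hf
    rw [pvUniq hu hxm hpx hmem hpi]

-- first matches as find?
lemma pvFind?_of_findIdx? {p : String → Bool} {toks : List String} {i : Nat}
    (hlt : i < toks.length) (h : toks.findIdx? p = some i) : toks.find? p = some toks[i] := by
  obtain ⟨hlt2, hp, hmin⟩ := List.findIdx?_eq_some_iff_getElem.mp h
  exact List.find?_eq_some_iff_getElem.mpr ⟨hp, i, hlt, rfl, fun j hj => by simpa using hmin j hj⟩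

-- ===== VERDICT (by name: the statement is the Claim_ definition above) =====
theorem segment_0_spec : Claim_equal_segment_0 := by
  intro signal _ hpre
  unfold Spec_segment_0
  rw [pvAltB_eq, segment_0, pvMain]
  unfold Pre_segment_0 at hpre
  generalize hT : PySem.Str.split₀ signal = toks at *
  cases h2 : toks.findIdx? pvP2 with
  | none =>
    have hf2 : toks.find? pvP2 = none := by
      rw [List.find?_eq_none]
      intro x hx
      simpa using List.findIdx?_eq_none_iff.mp h2 x hx
    simp only [pvAlt, pvAltB, h2, hf2]
  | some i2 =>
    obtain ⟨hlt2, hp2, -⟩ := List.findIdx?_eq_some_iff_getElem.mp h2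
    cases h3 : toks.findIdx? pvP3 with
    | none =>
      have hf3 : toks.find? pvP3 = none := by
        rw [List.find?_eq_none]
        intro x hx
        simpa using List.findIdx?_eq_none_iff.mp h3 x hx
      simp only [pvAlt, pvAltB, h2, h3, hf3, pvFind?_of_findIdx? hlt2 h2]
    | some i3 =>
      obtain ⟨hlt3, hp3, -⟩ := List.findIdx?_eq_some_iff_getElem.mp h3
      unfold pvPreTok at hpre
      rw [h2, h3] at hpre
      simp only [Option.bind_some, Option.map_some, Option.getD_some,
        Bool.and_eq_true, decide_eq_true_eq] at hpre
      obtain ⟨hu2, hu3⟩ := hpre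
      simp only [pvAlt, pvAltB, h2, h3, pvFindRev hlt2 hp2 (by omega : i2 < max i2 i3 + 1) hu2,
        pvFindRev hlt3 hp3 (by omega : i3 < max i2 i3 + 1) hu3,
        pvFind?_of_findIdx? hlt2 h2, pvFind?_of_findIdx? hlt3 h3]
      exact pvStrip_eq toks[i3] hp2
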